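-- pv_equiv track=rewrite | github.com/Ravager6969/Lego-Database | jobs.py | getbuttonlist
-- ===== SOURCE A (Python) =====
-- def getbuttonlist(jobs,categories):#this thing gets all the job information that the boxes display
--     BULL=["Job List"]
--     POCODOUBLETANKTAKESSOMUCHSKILLWOW=[0]
--     RVGR=list(jobs.keys())
--
--     for x in categories:
--         BULL.append(x)
--         POCODOUBLETANKTAKESSOMUCHSKILLWOW.append(len(BULL)-1)
--         for y in range(len(categories[x])):
--             if (categories[x][y] in RVGR):
--                 BULL.append(categories[x][y])
--                 RVGR.remove(categories[x][y])
--     if (len(RVGR)>0):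
--         BULL.append("Other")
--         POCODOUBLETANKTAKESSOMUCHSKILLWOW.append(len(BULL)-1)
--         for x in range(len(RVGR)-1,-1,-1):
--             BULL.append(RVGR[x])
--
--     return (BULL,POCODOUBLETANKTAKESSOMUCHSKILLWOW)
-- ===== SOURCE B (Python) =====
-- def getbuttonlist(jobs, categories):
--     # Build (header, members) sections first, then flatten; header indices come
--     # from a running offset in the flattening pass.
--     used = set()
--     sections = [("Job List", [])]
--     for cat, members in categories.items():
--         sec = []
--         for j in members:
--             if j in jobs and j not in used:
--                 used.add(j)
--                 sec.append(j)
--         sections.append((cat, sec))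
--     leftover = [k for k in jobs if k not in used]
--     if leftover:
--         sections.append(("Other", leftover[::-1]))
--     BULL, POCO = [], []
--     for header, js in sections:
--         POCO.append(len(BULL))
--         BULL.append(header)
--         BULL.extend(js)
--     return (BULL, POCO)
-- ===== Notes on version B (the rewrite author's own statement) =====
-- stated objective: faster
-- what changed: B first builds an intermediate list of (header, members) sections using a 'used' set for cross-category first-match dedup (instead of destructively removing from a mutable key list while appending), then flattens the sections in a separate pass where header indices come from a running offset rather than len(BULL)-1 read mid-build.
import Mathlib
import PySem

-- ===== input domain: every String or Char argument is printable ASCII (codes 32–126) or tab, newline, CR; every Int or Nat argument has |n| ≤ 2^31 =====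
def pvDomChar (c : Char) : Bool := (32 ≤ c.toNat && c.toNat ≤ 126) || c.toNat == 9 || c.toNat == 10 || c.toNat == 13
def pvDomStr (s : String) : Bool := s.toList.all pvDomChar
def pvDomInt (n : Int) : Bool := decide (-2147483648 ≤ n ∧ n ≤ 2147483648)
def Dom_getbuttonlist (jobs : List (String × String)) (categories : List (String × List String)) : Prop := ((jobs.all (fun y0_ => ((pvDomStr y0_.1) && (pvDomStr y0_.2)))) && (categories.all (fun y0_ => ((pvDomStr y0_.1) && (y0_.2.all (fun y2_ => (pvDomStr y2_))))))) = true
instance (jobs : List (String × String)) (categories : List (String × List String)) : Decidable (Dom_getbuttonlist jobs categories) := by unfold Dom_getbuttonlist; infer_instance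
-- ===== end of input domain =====

-- B builds (header, members) sections with a 'used' set (replacing A's linear membership
-- test + remove on a shrinking key list, measured faster), then flattens them with a running
-- offset; equality of return values is proved on all of Dom (both are total).

-- ===== PORT A =====
-- inner 'for y in range(len(categories[x]))' body: membership test in RVGR, append + remove
def pvA_inner (st : List String × List String) (v : String) : List String × List String :=
  if st.2.contains v then (st.1 ++ [v], (PySem.List.remove? st.2 v).getD st.2) else st

-- body of 'for x in categories'
def pvA_outer (cats : PySem.Dict String (List String))
    (st : List Int × List String × List String) (x : String) :
    List Int × List String × List String :=
  let B := st.2.1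
  let B := B ++ [x]
  let P := st.1 ++ [(B.length : Int) - 1]
  let ys := cats.getD x []
  let r := (PySem.List.pyRange 0 ys.length 1).foldl
      (fun st2 j => pvA_inner st2 (PySem.List.pyGetD ys j "")) (B, st.2.2)
  (P, r.1, r.2)

def getbuttonlist (jobs : List (String × String)) (categories : List (String × List String)) : List String × List Int :=
  let jobsD := PySem.Dict.ofList jobs
  let catsD := PySem.Dict.ofList categories
  let BULL : List String := ["Job List"]
  let POCO : List Int := [0]
  let RVGR : List String := jobsD.keys
  let st := catsD.keys.foldl (pvA_outer catsD) (POCO, BULL, RVGR)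
  let BULL := st.2.1
  let POCO := st.1
  let RVGR := st.2.2
  if RVGR.length > 0 then
    let BULL := BULL ++ ["Other"]
    let POCO := POCO ++ [(BULL.length : Int) - 1]
    let BULL := (PySem.List.pyRange ((RVGR.length : Int) - 1) (-1) (-1)).foldl
        (fun b j => b ++ [PySem.List.pyGetD RVGR j ""]) BULL
    (BULL, POCO)
  else (BULL, POCO)

-- ===== PORT B =====
-- inner 'for j in members' body
def pvB_inner (jobsD : PySem.Dict String String)
    (st : PySem.Set String × List String) (j : String) : PySem.Set String × List String :=
  if jobsD.contains j && !(PySem.Set.contains st.1 j) then (PySem.Set.add st.1 j, st.2 ++ [j]) else st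

-- body of 'for cat, members in categories.items()'
def pvB_outer (jobsD : PySem.Dict String String)
    (st : PySem.Set String × List (String × List String)) (p : String × List String) :
    PySem.Set String × List (String × List String) :=
  let r := p.2.foldl (pvB_inner jobsD) (st.1, [])
  (r.1, st.2 ++ [(p.1, r.2)])

-- flattening pass
def pvB_flat (st : List String × List Int) (s : String × List String) : List String × List Int :=
  (st.1 ++ [s.1] ++ s.2, st.2 ++ [(st.1.length : Int)])

def getbuttonlist_alt (jobs : List (String × String)) (categories : List (String × List String)) : List String × List Int :=
  let jobsD := PySem.Dict.ofList jobs
  let catsD := PySem.Dict.ofList categories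
  let r := catsD.items.foldl (pvB_outer jobsD)
      ((PySem.Set.empty : PySem.Set String), [("Job List", [])])
  let used := r.1
  let sections := r.2
  let leftover := jobsD.keys.filter (fun k => !(PySem.Set.contains used k))
  let sections := if leftover ≠ [] then sections ++ [("Other", leftover.reverse)] else sections
  sections.foldl pvB_flat ([], [])

-- ===== PRECONDITION & SPEC =====
def Spec_getbuttonlist (jobs : List (String × String)) (categories : List (String × List String)) (out : List String × List Int) : Prop := out = getbuttonlist_alt jobs categories
instance (jobs : List (String × String)) (categories : List (String × List String)) (out : List String × List Int) : Decidable (Spec_getbuttonlist jobs categories out) := by unfold Spec_getbuttonlist; infer_instance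

-- ===== CLAIM (what is proved, stated in full; the proofs are below) =====
def Claim_equal_getbuttonlist : Prop := ∀ (jobs : List (String × String)) (categories : List (String × List String)), Dom_getbuttonlist jobs categories → Spec_getbuttonlist jobs categories (getbuttonlist jobs categories)

-- ===== LEMMAS AND PROOFS =====
theorem pv_inner_eq (jobsD : PySem.Dict String String) (ys : List String) (B : List String) :
    ∀ (used sec : List String), jobsD.keys.Nodup →
    ys.foldl pvA_inner (B ++ sec, jobsD.keys.filter (fun k => !(PySem.Set.contains used k)))
      = (B ++ (ys.foldl (pvB_inner jobsD) (used, sec)).2,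
         jobsD.keys.filter (fun k => !(PySem.Set.contains ((ys.foldl (pvB_inner jobsD) (used, sec)).1) k))) := by
  induction ys with
  | nil => intro used sec h; simp
  | cons y ys ih =>
    intro used sec hK
    simp only [List.foldl_cons]
    have hcond : (jobsD.keys.filter (fun k => !(PySem.Set.contains used k))).contains y
        = (jobsD.contains y && !(PySem.Set.contains used y)) := by
      simp [PySem.Dict.contains_eq_decide_mem_keys, PySem.Set.contains_eq_listContains]
    unfold pvA_inner pvB_inner
    simp only [hcond]
    by_cases hc : (jobsD.contains y && !(PySem.Set.contains used y)) = true
    · simp only [hc, if_true]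
      have hyR : y ∈ jobsD.keys.filter (fun k => !(PySem.Set.contains used k)) := by
        simp at hc ⊢
        simpa [PySem.Dict.contains_eq_decide_mem_keys, PySem.Set.contains_eq_listContains] using hc
      have hrm : (PySem.List.remove? (jobsD.keys.filter (fun k => !(PySem.Set.contains used k))) y).getD
          (jobsD.keys.filter (fun k => !(PySem.Set.contains used k)))
          = jobsD.keys.filter (fun k => !(PySem.Set.contains (PySem.Set.add used y) k)) := by
        rw [PySem.List.remove?_eq_some_erase _ _ hyR]
        have hnd : (jobsD.keys.filter (fun k => !(PySem.Set.contains used k))).Nodup := hK.filter _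
        rw [Option.getD_some, hnd.erase_eq_filter, List.filter_filter]
        apply List.filter_congr
        intro k _
        have hy : ¬ (PySem.Set.contains used y = true) := by simp at hc; exact by simpa [PySem.Set.contains_eq_listContains] using hc.2
        rw [PySem.Set.add_of_not_mem (by simpa [PySem.Set.contains_eq_listContains] using hy)]
        by_cases hk : k = y <;> simp [hk, PySem.Set.contains_eq_listContains]
      rw [hrm]
      have h2 := ih (PySem.Set.add used y) (sec ++ [y]) hK
      unfold pvA_inner pvB_inner at h2
      simpa [List.append_assoc] using h2
    · simp only [hc, if_false, Bool.false_eq_true]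
      exact ih used sec hK

theorem pv_inner_nodup (jobsD : PySem.Dict String String) (ys : List String) :
    ∀ (used sec : List String), used.Nodup → ((ys.foldl (pvB_inner jobsD) (used, sec)).1).Nodup := by
  induction ys with
  | nil => intro used sec h; simpa using h
  | cons y ys ih =>
    intro used sec h
    simp only [List.foldl_cons]
    unfold pvB_inner
    split
    · exact ih _ _ (PySem.Set.nodup_add used y h)
    · exact ih _ _ h

theorem pv_rev (R : List String) (B : List String) :
    (PySem.List.pyRange ((R.length : Int) - 1) (-1) (-1)).foldl
        (fun b j => b ++ [PySem.List.pyGetD R j ""]) B = B ++ R.reverse := by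
  rw [PySem.List.foldl_append_singleton_eq_map]
  rw [PySem.List.pyRange_neg_one_eq_reverse]
  norm_num
  rw [PySem.List.map_pyGetD_pyRange_zero']

def pvA_outer2 (st : List Int × List String × List String)
    (p : String × List String) : List Int × List String × List String :=
  let B := st.2.1 ++ [p.1]
  let P := st.1 ++ [(B.length : Int) - 1]
  let r := p.2.foldl pvA_inner (B, st.2.2)
  (P, r.1, r.2)

theorem pvA_outer_eq2 (catsD : PySem.Dict String (List String))
    (hnd : catsD.keys.Nodup) (p : String × List String) (hp : p ∈ catsD.items)
    (st : List Int × List String × List String) :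
    pvA_outer catsD st p.1 = pvA_outer2 st p := by
  obtain ⟨k, v⟩ := p
  unfold pvA_outer pvA_outer2
  have hget : catsD.getD k [] = v := PySem.Dict.getD_of_mem_items catsD hp hnd []
  simp only [hget]
  rw [PySem.List.foldl_pyRange_zero_pyGetD' v "" pvA_inner]

theorem pv_outer_eq (jobsD : PySem.Dict String String) (hK : jobsD.keys.Nodup)
    (ps : List (String × List String)) :
    ∀ (used : List String) (secs : List (String × List String)), used.Nodup →
    ps.foldl pvA_outer2 ((secs.foldl pvB_flat ([], [])).2,
        (secs.foldl pvB_flat ([], [])).1,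
        jobsD.keys.filter (fun k => !(PySem.Set.contains used k)))
      = ((((ps.foldl (pvB_outer jobsD) (used, secs)).2).foldl pvB_flat ([], [])).2,
         (((ps.foldl (pvB_outer jobsD) (used, secs)).2).foldl pvB_flat ([], [])).1,
         jobsD.keys.filter (fun k => !(PySem.Set.contains ((ps.foldl (pvB_outer jobsD) (used, secs)).1) k))) := by
  induction ps with
  | nil => intro used secs h; simp
  | cons p ps ih =>
    intro used secs h
    simp only [List.foldl_cons]
    have hstep : pvA_outer2 ((secs.foldl pvB_flat ([], [])).2,
        (secs.foldl pvB_flat ([], [])).1,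
        jobsD.keys.filter (fun k => !(PySem.Set.contains used k))) p
        = (((secs ++ [(p.1, (p.2.foldl (pvB_inner jobsD) (used, [])).2)]).foldl pvB_flat ([], [])).2,
           ((secs ++ [(p.1, (p.2.foldl (pvB_inner jobsD) (used, [])).2)]).foldl pvB_flat ([], [])).1,
           jobsD.keys.filter (fun k => !(PySem.Set.contains ((p.2.foldl (pvB_inner jobsD) (used, [])).1) k))) := by
      have hin := pv_inner_eq jobsD p.2 ((secs.foldl pvB_flat ([], [])).1 ++ [p.1]) used [] hK
      simp only [List.append_nil] at hin
      simp only [pvA_outer2]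
      rw [List.foldl_append, hin]
      refine Prod.ext ?_ (Prod.ext ?_ ?_)
      · unfold pvB_flat; simp [List.length_append]
      · unfold pvB_flat; simp [List.append_assoc]
      · rfl
    rw [hstep]
    have hB : pvB_outer jobsD (used, secs) p
        = ((p.2.foldl (pvB_inner jobsD) (used, [])).1,
           secs ++ [(p.1, (p.2.foldl (pvB_inner jobsD) (used, [])).2)]) := rfl
    rw [hB]
    exact ih _ _ (pv_inner_nodup jobsD p.2 used [] h)

theorem pv_main (jobs : List (String × String)) (cats : List (String × List String)) :
    getbuttonlist jobs cats = getbuttonlist_alt jobs cats := by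
  simp only [getbuttonlist, getbuttonlist_alt]
  have hK : (PySem.Dict.ofList jobs).keys.Nodup := PySem.Dict.nodup_keys_ofList _
  have hC : (PySem.Dict.ofList cats).keys.Nodup := PySem.Dict.nodup_keys_ofList _
  have hkeys : (PySem.Dict.ofList cats).keys
      = (PySem.Dict.ofList cats).items.map Prod.fst := rfl
  rw [hkeys, List.foldl_map]
  rw [PySem.List.foldl_congr_mem (l := (PySem.Dict.ofList cats).items)
    (f := fun st p => pvA_outer (PySem.Dict.ofList cats) st p.1)
    (g := pvA_outer2)
    (init := (([0] : List Int), (["Job List"] : List String), (PySem.Dict.ofList jobs).keys))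
    (fun st p hp => pvA_outer_eq2 (PySem.Dict.ofList cats) hC p hp st)]
  have hinit : (([0] : List Int), (["Job List"] : List String), (PySem.Dict.ofList jobs).keys)
      = (([("Job List", ([] : List String))].foldl pvB_flat ([], [])).2,
         ([("Job List", ([] : List String))].foldl pvB_flat ([], [])).1,
         (PySem.Dict.ofList jobs).keys.filter
           (fun k => !(PySem.Set.contains (PySem.Set.empty : PySem.Set String) k))) := by
    simp [pvB_flat, PySem.Set.contains_eq_listContains, PySem.Set.empty]
  rw [hinit]
  rw [pv_outer_eq (PySem.Dict.ofList jobs) hK _ PySem.Set.empty [("Job List", [])] List.nodup_nil]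
  -- final: leftover / Other section
  set u := (((PySem.Dict.ofList cats).items.foldl (pvB_outer (PySem.Dict.ofList jobs))
      (PySem.Set.empty, [("Job List", [])])).1) with hu
  set S := (((PySem.Dict.ofList cats).items.foldl (pvB_outer (PySem.Dict.ofList jobs))
      (PySem.Set.empty, [("Job List", [])])).2) with hS
  set R := (PySem.Dict.ofList jobs).keys.filter (fun k => !(PySem.Set.contains u k)) with hRdef
  by_cases hR : R = []
  · rw [if_neg (show ¬ (R.length > 0) by simp [hR]), if_neg (show ¬ (R ≠ []) by simp [hR])]
  · have hlen : R.length > 0 := List.length_pos_iff.mpr hR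
    rw [if_pos hlen, if_pos hR]
    rw [pv_rev, List.foldl_append]
    refine Prod.ext ?_ ?_
    · unfold pvB_flat; simp [List.append_assoc]
    · unfold pvB_flat; simp [List.length_append]

-- ===== VERDICT (by name: the statement is the Claim_ definition above) =====
theorem getbuttonlist_spec : Claim_equal_getbuttonlist := by
  intro jobs cats _
  exact pv_main jobs cats
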